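-- pv_equiv track=rewrite | github.com/Sandcobra/nba_dfs | nba_dfs/agents/backtest_agent.py | _parse_lineup_str
-- ===== SOURCE A (Python) =====
-- def _parse_lineup_str(lineup_str: str) -> list[str]:
--     """Extract player names from DK lineup string like 'C Jay Huff F Desmond Bane ...'"""
--     slots  = {"PG","SG","SF","PF","C","G","F","UTIL"}
--     tokens = lineup_str.split()
--     names, buf = [], []
--     for tok in tokens:
--         if tok in slots:
--             if buf: names.append(" ".join(buf))
--             buf = []
--         else:
--             buf.append(tok)
--     if buf: names.append(" ".join(buf))
--     return [n.strip() for n in names if n.strip()]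
-- ===== SOURCE B (Python) =====
-- def _parse_lineup_str(lineup_str: str) -> list[str]:
--     """Extract player names from DK lineup string like 'C Jay Huff F Desmond Bane ...'"""
--     slots = {"PG", "SG", "SF", "PF", "C", "G", "F", "UTIL"}
--     names = []
--     toks = lineup_str.split()
--     # partition the token list into maximal runs of equal key (tok in slots);
--     # each run whose key is False is one player name
--     while toks:
--         is_slot = toks[0] in slots
--         run_len = 1
--         while run_len < len(toks) and (toks[run_len] in slots) == is_slot:
--             run_len += 1
--         if not is_slot:
--             names.append(" ".join(toks[:run_len]))
--         toks = toks[run_len:]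
--     return [n.strip() for n in names if n.strip()]
-- ===== Notes on version B (the rewrite author's own statement) =====
-- stated objective: alternative
-- what changed: Replaces the buffer-and-branch accumulator loop with a run-partition: the token list is split into maximal runs of equal key (token in slots) and each non-slot run is joined into a name.
import Mathlib
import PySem

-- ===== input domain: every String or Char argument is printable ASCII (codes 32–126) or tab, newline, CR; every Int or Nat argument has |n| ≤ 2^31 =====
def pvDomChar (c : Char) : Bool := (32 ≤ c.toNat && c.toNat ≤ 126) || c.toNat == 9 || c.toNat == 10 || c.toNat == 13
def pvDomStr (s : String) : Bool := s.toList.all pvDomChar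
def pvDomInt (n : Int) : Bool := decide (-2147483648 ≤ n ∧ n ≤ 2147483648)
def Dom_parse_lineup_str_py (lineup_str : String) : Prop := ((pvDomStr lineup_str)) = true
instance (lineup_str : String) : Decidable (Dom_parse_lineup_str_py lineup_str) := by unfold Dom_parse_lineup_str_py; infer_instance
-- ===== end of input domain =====

-- B replaces A's buffer-and-branch accumulation by a run-partition of the token list
-- (maximal runs of equal key 'token in slots'); same return value, no speed claim.

def pvSlots : PySem.Set String :=
  PySem.Set.ofList ["PG", "SG", "SF", "PF", "C", "G", "F", "UTIL"]

-- ===== PORT A =====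
def parse_lineup_str_py (lineup_str : String) : List String :=
  let tokens := PySem.Str.split₀ lineup_str
  let st := tokens.foldl
    (fun (st : List String × List String) tok =>
      if PySem.Set.contains pvSlots tok then
        (if st.2 ≠ [] then st.1 ++ [PySem.Str.join " " st.2] else st.1, [])
      else
        (st.1, st.2 ++ [tok]))
    ([], [])
  let names := if st.2 ≠ [] then st.1 ++ [PySem.Str.join " " st.2] else st.1
  names.filterMap (fun n => if PySem.Str.strip n ≠ "" then some (PySem.Str.strip n) else none)

-- ===== PORT B =====
-- the outer 'while toks:' loop of Source B; the inner 'run_len' scan and the slices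
-- toks[:run_len] / toks[run_len:] are exactly takeWhile / dropWhile of the same key test
def pvRuns (toks : List String) : List String :=
  match toks with
  | [] => []
  | t :: ts =>
    let is_slot := PySem.Set.contains pvSlots t
    let run := t :: ts.takeWhile (fun x => PySem.Set.contains pvSlots x == is_slot)
    let rest := ts.dropWhile (fun x => PySem.Set.contains pvSlots x == is_slot)
    (if !is_slot then [PySem.Str.join " " run] else []) ++ pvRuns rest
termination_by toks.length
decreasing_by
  simpa using Nat.lt_succ_of_le (List.length_dropWhile_le _ _)

def parse_lineup_str_py_alt (lineup_str : String) : List String :=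
  (pvRuns (PySem.Str.split₀ lineup_str)).filterMap
    (fun n => if PySem.Str.strip n ≠ "" then some (PySem.Str.strip n) else none)

-- ===== PRECONDITION & SPEC =====
def Spec_parse_lineup_str_py (lineup_str : String) (out : List String) : Prop := out = parse_lineup_str_py_alt lineup_str
instance (lineup_str : String) (out : List String) : Decidable (Spec_parse_lineup_str_py lineup_str out) := by unfold Spec_parse_lineup_str_py; infer_instance

-- ===== CLAIM (what is proved, stated in full; the proofs are below) =====
def Claim_equal_parse_lineup_str_py : Prop := ∀ (lineup_str : String), Dom_parse_lineup_str_py lineup_str → Spec_parse_lineup_str_py lineup_str (parse_lineup_str_py lineup_str)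

-- ===== LEMMAS AND PROOFS =====

-- common reference recursion: A's buffer loop written as structural recursion
def pvGo (buf : List String) : List String → List String
  | [] => if buf ≠ [] then [PySem.Str.join " " buf] else []
  | t :: ts =>
    if PySem.Set.contains pvSlots t then
      (if buf ≠ [] then [PySem.Str.join " " buf] else []) ++ pvGo [] ts
    else
      pvGo (buf ++ [t]) ts

theorem pvFold_eq_go (toks : List String) : ∀ (names buf : List String),
    (if (toks.foldl
      (fun (st : List String × List String) tok =>
        if PySem.Set.contains pvSlots tok then
          (if st.2 ≠ [] then st.1 ++ [PySem.Str.join " " st.2] else st.1, [])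
        else
          (st.1, st.2 ++ [tok]))
      (names, buf)).2 ≠ []
     then (toks.foldl
      (fun (st : List String × List String) tok =>
        if PySem.Set.contains pvSlots tok then
          (if st.2 ≠ [] then st.1 ++ [PySem.Str.join " " st.2] else st.1, [])
        else
          (st.1, st.2 ++ [tok]))
      (names, buf)).1 ++ [PySem.Str.join " " (toks.foldl
      (fun (st : List String × List String) tok =>
        if PySem.Set.contains pvSlots tok then
          (if st.2 ≠ [] then st.1 ++ [PySem.Str.join " " st.2] else st.1, [])
        else
          (st.1, st.2 ++ [tok]))
      (names, buf)).2]
     else (toks.foldl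
      (fun (st : List String × List String) tok =>
        if PySem.Set.contains pvSlots tok then
          (if st.2 ≠ [] then st.1 ++ [PySem.Str.join " " st.2] else st.1, [])
        else
          (st.1, st.2 ++ [tok]))
      (names, buf)).1)
    = names ++ pvGo buf toks := by
  induction toks with
  | nil => intro names buf; simp [pvGo]; split <;> simp
  | cons t ts ih =>
    intro names buf
    simp only [List.foldl_cons, pvGo]
    by_cases h : PySem.Set.contains pvSlots t = true
    · simp only [h, if_pos]
      rw [ih]
      split <;> simp
    · simp only [h, if_neg, Bool.false_eq_true, not_false_iff]
      rw [ih]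

theorem pvGo_false_run (g : List String) : ∀ (rest buf : List String),
    (∀ t ∈ g, PySem.Set.contains pvSlots t = false) →
    pvGo buf (g ++ rest) = pvGo (buf ++ g) rest := by
  induction g with
  | nil => simp
  | cons t ts ih =>
    intro rest buf h
    have ht := h t (by simp)
    simp only [List.cons_append, pvGo, ht, Bool.false_eq_true, if_false]
    rw [ih rest (buf ++ [t]) (fun x hx => h x (by simp [hx]))]
    simp

theorem pvGo_true_run (g : List String) : ∀ (rest : List String),
    (∀ t ∈ g, PySem.Set.contains pvSlots t = true) →
    pvGo [] (g ++ rest) = pvGo [] rest := by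
  induction g with
  | nil => simp
  | cons t ts ih =>
    intro rest h
    have ht := h t (by simp)
    simp only [List.cons_append, pvGo, ht, if_pos]
    simp only [ne_eq, not_true_eq_false]
    exact ih rest (fun x hx => h x (by simp [hx]))

theorem pvGo_emit (buf rest : List String)
    (h : rest = [] ∨ ∃ r rs, rest = r :: rs ∧ PySem.Set.contains pvSlots r = true) :
    pvGo buf rest = (if buf ≠ [] then [PySem.Str.join " " buf] else []) ++ pvGo [] rest := by
  rcases h with h | ⟨r, rs, hrest, hr⟩
  · subst h; simp [pvGo]
  · subst hrest
    simp only [pvGo, hr, if_true]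
    split <;> simp

theorem pvGo_eq_runs (toks : List String) : pvGo [] toks = pvRuns toks := by
  induction hn : toks.length using Nat.strong_induction_on generalizing toks with
  | _ n ih =>
  match toks, hn with
  | [], _ => simp [pvGo, pvRuns]
  | t :: ts, hn =>
    rw [pvRuns]
    set k := PySem.Set.contains pvSlots t with hk
    set g := ts.takeWhile (fun x => PySem.Set.contains pvSlots x == k) with hg
    set rest := ts.dropWhile (fun x => PySem.Set.contains pvSlots x == k) with hrest
    have hsplit : t :: ts = (t :: g) ++ rest := by
      simp [hg, hrest, List.takeWhile_append_dropWhile]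
    have hglen : rest.length < n := by
      rw [← hn]
      simpa using Nat.lt_succ_of_le (List.length_dropWhile_le _ _)
    have hgkey : ∀ x ∈ t :: g, PySem.Set.contains pvSlots x = k := by
      intro x hx
      rcases List.mem_cons.mp hx with h | h
      · rw [h]
      · have := List.mem_takeWhile_imp (hg ▸ h)
        simpa using this
    have hresthead : rest = [] ∨ ∃ r rs, rest = r :: rs ∧
        (PySem.Set.contains pvSlots r == k) = false := by
      cases hr : rest with
      | nil => exact Or.inl rfl
      | cons r rs =>
        refine Or.inr ⟨r, rs, rfl, ?_⟩
        have := List.head?_dropWhile_not (fun x => PySem.Set.contains pvSlots x == k) ts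
        rw [← hrest, hr] at this
        simpa using this
    rw [hsplit]
    by_cases hkt : k = true
    · rw [pvGo_true_run _ _ (fun x hx => (hgkey x hx).trans hkt)]
      rw [ih rest.length hglen rest rfl]
      simp [hkt]
    · have hkf : k = false := by simpa using hkt
      rw [pvGo_false_run _ _ _ (fun x hx => (hgkey x hx).trans hkf)]
      have hresthead' : rest = [] ∨ ∃ r rs, rest = r :: rs ∧
          PySem.Set.contains pvSlots r = true := by
        rcases hresthead with h | ⟨r, rs, h1, h2⟩
        · exact Or.inl h
        · refine Or.inr ⟨r, rs, h1, ?_⟩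
          rw [hkf] at h2
          simpa using h2
      rw [pvGo_emit _ _ hresthead']
      rw [ih rest.length hglen rest rfl]
      simp [hkf]

-- ===== VERDICT (by name: the statement is the Claim_ definition above) =====
theorem parse_lineup_str_py_spec : Claim_equal_parse_lineup_str_py := by
  intro s _
  simp only [Spec_parse_lineup_str_py, parse_lineup_str_py, parse_lineup_str_py_alt]
  rw [pvFold_eq_go, pvGo_eq_runs]
  simp
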